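-- pv_equiv track=rewrite | github.com/MukuFlash03/recruiter-ai-agent | Agent_Backend/db/helpers.py | organize_interview_data
-- ===== SOURCE A (Python) =====
-- from typing import Dict, Any, List, Union
--
-- def organize_interview_data(interviews_data: List[Dict[str, Any]]) -> Dict[str, Dict[str, List[Dict[str, Any]]]]:
--     organized_data = {}
--
--     for interview in interviews_data:
--         recruiter_id = interview['recruiter_id']
--         candidate_id = interview['candidate_id']
--
--         if recruiter_id not in organized_data:
--             organized_data[recruiter_id] = {}
--
--         if candidate_id not in organized_data[recruiter_id]:
--             organized_data[recruiter_id][candidate_id] = []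
--
--         organized_data[recruiter_id][candidate_id].append(interview)
--
--     return organized_data
-- ===== SOURCE B (Python) =====
-- def group_by(items, key_field):
--     groups = {}
--     for it in items:
--         k = it[key_field]
--         groups[k] = groups.get(k, []) + [it]
--     return groups
--
-- def organize_interview_data(interviews_data):
--     return {rid: group_by(sub, 'candidate_id')
--             for rid, sub in group_by(interviews_data, 'recruiter_id').items()}
-- ===== Notes on version B (the rewrite author's own statement) =====
-- stated objective: simpler
-- what changed: Replaces A's single interleaved pass that maintains and patches a nested dict with a generic one-pass group_by helper applied twice: once by recruiter_id, then each recruiter's sublist regrouped by candidate_id.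
import Mathlib
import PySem

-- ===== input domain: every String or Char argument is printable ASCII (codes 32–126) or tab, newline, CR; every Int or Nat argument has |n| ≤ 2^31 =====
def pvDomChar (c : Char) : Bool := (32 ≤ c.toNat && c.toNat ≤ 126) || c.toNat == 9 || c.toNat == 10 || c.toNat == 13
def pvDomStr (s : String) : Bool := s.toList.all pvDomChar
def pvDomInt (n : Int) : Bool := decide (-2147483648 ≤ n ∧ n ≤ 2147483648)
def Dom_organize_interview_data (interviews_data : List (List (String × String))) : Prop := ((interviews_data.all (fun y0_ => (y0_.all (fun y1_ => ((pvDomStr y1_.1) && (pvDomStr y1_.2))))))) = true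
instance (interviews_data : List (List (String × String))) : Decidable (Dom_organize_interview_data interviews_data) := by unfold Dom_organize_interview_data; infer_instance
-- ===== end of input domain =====

-- B replaces A's single interleaved pass maintaining a nested dict by a generic one-pass
-- group_by helper applied twice (by recruiter, then each sublist by candidate): simpler decomposition.

-- shared helper: interview[k] (dict lookup, first match); Pre_ guarantees the key is present,
-- the "" default is never reached on admitted inputs (Python raises KeyError there)
def pvKey (iv : List (String × String)) (k : String) : String :=
  ((PySem.Dict.mk iv).get? k).getD ""

-- ===== PORT A =====
def organize_interview_data (interviews_data : List (List (String × String))) : List (String × List (String × List (List (String × String)))) :=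
  let organized := interviews_data.foldl (fun d interview =>
    let recruiter_id := pvKey interview "recruiter_id"
    let candidate_id := pvKey interview "candidate_id"
    let d := if d.contains recruiter_id then d else d.insert recruiter_id PySem.Dict.empty
    let sub := d.getD recruiter_id PySem.Dict.empty
    let sub := if sub.contains candidate_id then sub else sub.insert candidate_id []
    d.insert recruiter_id (sub.modify candidate_id [] (· ++ [interview]))
  ) PySem.Dict.empty
  organized.items.map (fun p => (p.1, p.2.items))

-- ===== PORT B =====
-- groups[k] = groups.get(k, []) + [it]  is exactly Dict.modify k [] (· ++ [it])
def group_by (items : List (List (String × String))) (key_field : String) : PySem.Dict String (List (List (String × String))) :=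
  items.foldl (fun groups it => groups.modify (pvKey it key_field) [] (· ++ [it])) PySem.Dict.empty

def organize_interview_data_alt (interviews_data : List (List (String × String))) : List (String × List (String × List (List (String × String)))) :=
  (group_by interviews_data "recruiter_id").items.map
    (fun p => (p.1, (group_by p.2 "candidate_id").items))

-- ===== PRECONDITION & SPEC =====
-- Pre_: every interview dict has both keys; on any other interview Python A (and B) raises KeyError.
def Pre_organize_interview_data (interviews_data : List (List (String × String))) : Prop :=
  (interviews_data.all (fun iv =>
    (PySem.Dict.mk iv).contains "recruiter_id" && (PySem.Dict.mk iv).contains "candidate_id")) = true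
instance (interviews_data : List (List (String × String))) : Decidable (Pre_organize_interview_data interviews_data) := by unfold Pre_organize_interview_data; infer_instance

def pvWitness_organize_interview_data : (List (List (String × String))) :=
  [[("recruiter_id", "r1"), ("candidate_id", "c1")],
   [("recruiter_id", "r1"), ("candidate_id", "c2")]]

def Spec_organize_interview_data (interviews_data : List (List (String × String))) (out : List (String × List (String × List (List (String × String))))) : Prop := out = organize_interview_data_alt interviews_data
instance (interviews_data : List (List (String × String))) (out : List (String × List (String × List (List (String × String))))) : Decidable (Spec_organize_interview_data interviews_data out) := by
  unfold Spec_organize_interview_data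
  letI d1 : DecidableEq (String × List (List (String × String))) := inferInstance
  letI d2 : DecidableEq (String × List (String × List (List (String × String)))) := inferInstance
  letI d3 : DecidableEq (List (String × List (String × List (List (String × String))))) := inferInstance
  exact d3 _ _

-- ===== CLAIM (what is proved, stated in full; the proofs are below) =====
def Claim_equal_organize_interview_data : Prop := ∀ (interviews_data : List (List (String × String))), Dom_organize_interview_data interviews_data → Pre_organize_interview_data interviews_data → Spec_organize_interview_data interviews_data (organize_interview_data interviews_data)

-- ===== LEMMAS AND PROOFS =====

-- A's loop body equals a single nested Dict.modify
lemma stepA_eq_modify (d : PySem.Dict String (PySem.Dict String (List (List (String × String))))) (iv : List (String × String)) :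
    (let r := pvKey iv "recruiter_id"
     let c := pvKey iv "candidate_id"
     let d := if d.contains r then d else d.insert r PySem.Dict.empty
     let sub := d.getD r PySem.Dict.empty
     let sub := if sub.contains c then sub else sub.insert c []
     d.insert r (sub.modify c [] (· ++ [iv])))
    = d.modify (pvKey iv "recruiter_id") PySem.Dict.empty
        (fun sub => sub.modify (pvKey iv "candidate_id") [] (· ++ [iv])) := by
  show (let d1 := if d.contains (pvKey iv "recruiter_id") then d
                  else d.insert (pvKey iv "recruiter_id") PySem.Dict.empty
        let sub := d1.getD (pvKey iv "recruiter_id") PySem.Dict.empty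
        let sub1 := if sub.contains (pvKey iv "candidate_id") then sub
                    else sub.insert (pvKey iv "candidate_id") []
        d1.insert (pvKey iv "recruiter_id") (sub1.modify (pvKey iv "candidate_id") [] (· ++ [iv])))
      = d.insert (pvKey iv "recruiter_id")
          ((d.getD (pvKey iv "recruiter_id") PySem.Dict.empty).modify (pvKey iv "candidate_id") [] (· ++ [iv]))
  cases hr : d.contains (pvKey iv "recruiter_id") with
  | true =>
    simp only [if_true]
    cases hc : (d.getD (pvKey iv "recruiter_id") PySem.Dict.empty).contains (pvKey iv "candidate_id") with
    | true => simp only [if_true]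
    | false =>
      simp only [Bool.false_eq_true, if_false, PySem.Dict.modify,
        PySem.Dict.getD_insert_self, PySem.Dict.insert_insert_self,
        PySem.Dict.getD_of_not_contains _ _ hc]
  | false =>
    simp only [Bool.false_eq_true, if_false, PySem.Dict.getD_insert_self,
      PySem.Dict.contains_empty, PySem.Dict.modify, PySem.Dict.getD_empty,
      PySem.Dict.insert_insert_self, PySem.Dict.getD_of_not_contains _ _ hr]

-- mapping a function over the values commutes with contains / get?
lemma contains_mapv {α β : Type} (l : List (String × α)) (f : α → β) (k : String) :
    (PySem.Dict.mk (l.map (fun p => (p.1, f p.2)))).contains k = (PySem.Dict.mk l).contains k := by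
  simp [PySem.Dict.contains, List.any_map, Function.comp_def]

lemma get?_mapv {α β : Type} (l : List (String × α)) (f : α → β) (k : String) :
    (PySem.Dict.mk (l.map (fun p => (p.1, f p.2)))).get? k = ((PySem.Dict.mk l).get? k).map f := by
  induction l with
  | nil => rfl
  | cons p rest ih =>
    obtain ⟨a, w⟩ := p
    rw [List.map_cons]
    cases h : a == k with
    | true => simp only [PySem.Dict.get?_mk_cons, h, if_true, Option.map_some]
    | false =>
      simp only [PySem.Dict.get?_mk_cons, h, Bool.false_eq_true, if_false]
      exact ih

-- Dict.modify on a value-mapped dict = value-map of Dict.modify, when the update commutes with f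
lemma modify_mapv {α β : Type} (G : PySem.Dict String α) (f : α → β) (u : α → α) (g : β → β)
    (k : String) (dV : α) (dW : β)
    (h : ∀ v, g (f v) = f (u v)) (h0 : g dW = f (u dV)) :
    (PySem.Dict.mk (G.items.map (fun p => (p.1, f p.2)))).modify k dW g
      = PySem.Dict.mk ((G.modify k dV u).items.map (fun p => (p.1, f p.2))) := by
  simp only [PySem.Dict.modify, PySem.Dict.insert, contains_mapv]
  by_cases hk : G.contains k
  · simp only [hk, if_true]
    have hk' := hk
    rw [PySem.Dict.contains_eq_isSome_get?] at hk'
    obtain ⟨v, hv⟩ := Option.isSome_iff_exists.mp hk'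
    have hG : G.getD k dV = v := by simp [PySem.Dict.getD, hv]
    have hM : (PySem.Dict.mk (G.items.map (fun p => (p.1, f p.2)))).getD k dW = f v := by
      simp [PySem.Dict.getD, get?_mapv, hv]
    rw [hM, hG, h v]
    apply PySem.Dict.ext
    simp only [List.map_map]
    apply List.map_congr_left
    intro p _
    by_cases hp : p.1 = k <;> simp [hp]
  · simp only [hk, Bool.false_eq_true, if_false]
    have hk' := hk
    rw [PySem.Dict.contains_eq_isSome_get?] at hk'
    have hg : G.get? k = none := by
      cases hE : G.get? k
      · rfl
      · rw [hE] at hk'; simp at hk'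
    have hG : G.getD k dV = dV := by simp [PySem.Dict.getD, hg]
    have hM : (PySem.Dict.mk (G.items.map (fun p => (p.1, f p.2)))).getD k dW = dW := by
      simp [PySem.Dict.getD, get?_mapv, hg]
    rw [hM, hG, h0]
    apply PySem.Dict.ext
    simp

-- group_by over a snoc
lemma group_by_snoc (xs : List (List (String × String))) (iv : List (String × String)) (key : String) :
    group_by (xs ++ [iv]) key = (group_by xs key).modify (pvKey iv key) [] (· ++ [iv]) := by
  simp [group_by, List.foldl_append]

-- main invariant: A's folded nested dict is the value-mapped double grouping
lemma foldA_eq (xs : List (List (String × String))) :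
    xs.foldl (fun d iv => d.modify (pvKey iv "recruiter_id") PySem.Dict.empty
        (fun sub => sub.modify (pvKey iv "candidate_id") [] (· ++ [iv]))) PySem.Dict.empty
      = PySem.Dict.mk ((group_by xs "recruiter_id").items.map
          (fun p => (p.1, group_by p.2 "candidate_id"))) := by
  induction xs using List.reverseRecOn with
  | nil => rfl
  | append_singleton xs iv ih =>
    rw [List.foldl_append, List.foldl_cons, List.foldl_nil, ih, group_by_snoc]
    exact modify_mapv (group_by xs "recruiter_id") (fun v => group_by v "candidate_id")
      (· ++ [iv]) (fun sub => sub.modify (pvKey iv "candidate_id") [] (· ++ [iv]))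
      (pvKey iv "recruiter_id") [] PySem.Dict.empty
      (fun v => (group_by_snoc v iv "candidate_id").symm)
      (by rfl)

-- ===== VERDICT (by name: the statement is the Claim_ definition above) =====
theorem organize_interview_data_spec : Claim_equal_organize_interview_data := by
  intro xs _ _
  unfold Spec_organize_interview_data organize_interview_data organize_interview_data_alt
  have hstep : (fun (d : PySem.Dict String (PySem.Dict String (List (List (String × String))))) interview =>
      let recruiter_id := pvKey interview "recruiter_id"
      let candidate_id := pvKey interview "candidate_id"
      let d := if d.contains recruiter_id then d else d.insert recruiter_id PySem.Dict.empty
      let sub := d.getD recruiter_id PySem.Dict.empty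
      let sub := if sub.contains candidate_id then sub else sub.insert candidate_id []
      d.insert recruiter_id (sub.modify candidate_id [] (· ++ [interview])))
    = (fun d iv => d.modify (pvKey iv "recruiter_id") PySem.Dict.empty
        (fun sub => sub.modify (pvKey iv "candidate_id") [] (· ++ [iv]))) := by
    funext d iv; exact stepA_eq_modify d iv
  rw [hstep, foldA_eq]
  simp [List.map_map, Function.comp_def]
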